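-- pv_equiv track=rewrite | github.com/Unknownflow/CS1010X | PracticalExam/2024/template.py | check
-- ===== SOURCE A (Python) =====
-- def check(car_lst_in, car_lst_out):
--     car_out_idx = len(car_lst_out) - 1
--     car_in_idx = 0
--     queue = []
--     stack = []
--
--     while car_out_idx >= 0:
--         next = car_lst_out[car_out_idx]
--
--         if next in stack:
--             while True:
--                 popped = stack.pop()
--                 queue = [popped] + queue
--                 if popped == next:
--                     break
--         else:
--             found = False
--
--             while car_in_idx < len(car_lst_in) and not found:
--                 car = car_lst_in[car_in_idx]
--                 if car == next:
--                     found = True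
--                     queue = [car] + queue
--                 else:
--                     stack.append(car)
--                 car_in_idx += 1
--         car_out_idx -= 1
--
--
--     if queue == car_lst_out:
--         return "possible"
--     else:
--         return "impossible"
-- ===== SOURCE B (Python) =====
-- def check(car_lst_in, car_lst_out):
--     # Per-step verdict: each target (taken from the back of the exit order)
--     # must be exactly the current stack top, or the next matching car still
--     # waiting in the input; otherwise the order is impossible.
--     stack = []
--     j = 0
--     for t in reversed(car_lst_out):
--         if t in stack:
--             if stack[-1] != t:
--                 return "impossible"
--             stack.pop()
--         else:
--             while j < len(car_lst_in) and car_lst_in[j] != t: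
--                 stack.append(car_lst_in[j])
--                 j += 1
--             if j >= len(car_lst_in):
--                 return "impossible"
--             j += 1
--     return "possible"
-- ===== Notes on version B (the rewrite author's own statement) =====
-- stated objective: simpler
-- what changed: B drops A's queue (built by repeated list prepends), A's pop-until-match inner loop and the final whole-list comparison: it decides each step locally - a target already in the stack must be exactly the stack top, otherwise it is sought in the remaining input - returning 'impossible' at the first failing step.
import Mathlib
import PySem

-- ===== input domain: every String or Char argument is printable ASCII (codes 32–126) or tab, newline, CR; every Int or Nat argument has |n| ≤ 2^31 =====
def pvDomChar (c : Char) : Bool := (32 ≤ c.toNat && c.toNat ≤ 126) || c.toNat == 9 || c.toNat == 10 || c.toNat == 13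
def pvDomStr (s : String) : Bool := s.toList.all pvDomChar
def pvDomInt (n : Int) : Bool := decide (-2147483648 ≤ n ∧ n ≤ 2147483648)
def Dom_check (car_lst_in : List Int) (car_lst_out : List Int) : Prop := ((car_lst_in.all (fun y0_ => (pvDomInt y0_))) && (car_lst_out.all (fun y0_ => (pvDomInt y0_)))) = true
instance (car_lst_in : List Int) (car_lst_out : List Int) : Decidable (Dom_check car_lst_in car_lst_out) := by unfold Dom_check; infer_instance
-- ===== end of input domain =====

-- B decides each step locally (stack top / next input match) with early returns,
-- dropping A's queue building by repeated prepends and its final whole-list comparison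
-- (objective: simpler).

-- ===== PORT A =====
-- A's stack has its top at the END of the Python list; here it is kept top-at-HEAD
-- (push = cons, pop = uncons), the faithful encoding of a stack as a Lean list.
-- The inner "pop until popped == next" loop (guarded by 'next in stack'):
-- each popped element is PREPENDED to queue ('queue = [popped] + queue').
def checkPopUntil (t : Int) (stack : List Int) (queue : List Int) : List Int × List Int :=
  match stack with
  | [] => ([], queue)        -- unreachable: guarded by 't ∈ stack' in the caller
  | p :: s => if p = t then (s, t :: queue) else checkPopUntil t s (p :: queue)

-- the 'while car_in_idx < len(car_lst_in) and not found' scan; advancing car_in_idx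
-- is consuming the remaining input list; returns (stack, remaining input, queue)
def checkScan (t : Int) (rest : List Int) (stack : List Int) (queue : List Int) :
    List Int × List Int × List Int :=
  match rest with
  | [] => (stack, [], queue)
  | c :: cs => if c = t then (stack, cs, t :: queue) else checkScan t cs (c :: stack) queue

-- the outer 'while car_out_idx >= 0' loop: car_lst_out[car_out_idx] for
-- car_out_idx = len-1, …, 0 is exactly car_lst_out.reverse traversed in order
def checkLoop (ts : List Int) (rest : List Int) (stack : List Int) (queue : List Int) : List Int :=
  match ts with
  | [] => queue
  | t :: ts' =>
    if t ∈ stack then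
      let r := checkPopUntil t stack queue
      checkLoop ts' rest r.1 r.2
    else
      let r := checkScan t rest stack queue
      checkLoop ts' r.2.1 r.1 r.2.2

def check (car_lst_in : List Int) (car_lst_out : List Int) : String :=
  if checkLoop car_lst_out.reverse car_lst_in [] [] = car_lst_out then "possible" else "impossible"

-- ===== PORT B =====
-- Source B's inner 'while j < len(car_lst_in) and car_lst_in[j] != t' scan: advancing j is
-- consuming the input list; returns none for the 'j >= len' early "impossible" return,
-- some (stack, remaining input) after the matching 'j += 1'.
def altScan (t : Int) (rest : List Int) (stack : List Int) : Option (List Int × List Int) :=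
  match rest with
  | [] => none
  | c :: cs => if c = t then some (stack, cs) else altScan t cs (c :: stack)

-- the 'for t in reversed(car_lst_out)' loop with its two early "impossible" returns
def altLoop (ts : List Int) (rest : List Int) (stack : List Int) : String :=
  match ts with
  | [] => "possible"
  | t :: ts' =>
    if t ∈ stack then
      match stack with
      | [] => "impossible"   -- unreachable: 't ∈ stack' guarantees a top
      | p :: s => if p ≠ t then "impossible" else altLoop ts' rest s
    else
      match altScan t rest stack with
      | none => "impossible"
      | some r => altLoop ts' r.2 r.1

def check_alt (car_lst_in : List Int) (car_lst_out : List Int) : String :=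
  altLoop car_lst_out.reverse car_lst_in []

-- ===== PRECONDITION & SPEC =====
def Spec_check (car_lst_in : List Int) (car_lst_out : List Int) (out : String) : Prop := out = check_alt car_lst_in car_lst_out
instance (car_lst_in : List Int) (car_lst_out : List Int) (out : String) : Decidable (Spec_check car_lst_in car_lst_out out) := by unfold Spec_check; infer_instance

-- ===== CLAIM (what is proved, stated in full; the proofs are below) =====
def Claim_equal_check : Prop := ∀ (car_lst_in : List Int) (car_lst_out : List Int), Dom_check car_lst_in car_lst_out → Spec_check car_lst_in car_lst_out (check car_lst_in car_lst_out)

-- ===== LEMMAS AND PROOFS =====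

-- proof-side: the chunk of cars A's pop loop emits, and the resulting stack
def popE (t : Int) (stack : List Int) : List Int × List Int :=
  match stack with
  | [] => ([], [])
  | p :: s => if p = t then (s, [t]) else
      let r := popE t s
      (r.1, p :: r.2)

-- proof-side: what A's scan emits ([] or [t]) and the resulting stack/input
def scanE (t : Int) (rest : List Int) (stack : List Int) : List Int × List Int × List Int :=
  match rest with
  | [] => (stack, [], [])
  | c :: cs => if c = t then (stack, cs, [t]) else scanE t cs (c :: stack)

-- proof-side: the full emission stream of A's run
def emitE (ts : List Int) (rest : List Int) (stack : List Int) : List Int :=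
  match ts with
  | [] => []
  | t :: ts' =>
    if t ∈ stack then
      let r := popE t stack
      r.2 ++ emitE ts' rest r.1
    else
      let r := scanE t rest stack
      r.2.2 ++ emitE ts' r.2.1 r.1

theorem checkPopUntil_eq (t : Int) (stack queue : List Int) :
    checkPopUntil t stack queue = ((popE t stack).1, (popE t stack).2.reverse ++ queue) := by
  induction stack generalizing queue with
  | nil => simp [checkPopUntil, popE]
  | cons p s ih =>
    by_cases hp : p = t
    · simp [checkPopUntil, popE, hp]
    · simp [checkPopUntil, popE, hp, ih]

theorem checkScan_eq (t : Int) (rest stack queue : List Int) :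
    checkScan t rest stack queue =
      ((scanE t rest stack).1, (scanE t rest stack).2.1,
        (scanE t rest stack).2.2.reverse ++ queue) := by
  induction rest generalizing stack with
  | nil => simp [checkScan, scanE]
  | cons c cs ih =>
    by_cases hc : c = t
    · simp [checkScan, scanE, hc]
    · simp [checkScan, scanE, hc, ih]

theorem checkLoop_eq (ts : List Int) (rest stack queue : List Int) :
    checkLoop ts rest stack queue = (emitE ts rest stack).reverse ++ queue := by
  induction ts generalizing rest stack queue with
  | nil => simp [checkLoop, emitE]
  | cons t ts' ih =>
    by_cases ht : t ∈ stack
    · simp [checkLoop, emitE, ht, checkPopUntil_eq, ih]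
    · simp [checkLoop, emitE, ht, checkScan_eq, ih]

-- popE never invents elements: both components draw from the stack
theorem popE_fst_subset (t : Int) (stack : List Int) :
    ∀ x ∈ (popE t stack).1, x ∈ stack := by
  induction stack with
  | nil => simp [popE]
  | cons p s ih =>
    by_cases hp : p = t
    · simp [popE, hp]; intro x hx; exact Or.inr hx
    · simp [popE, hp]; intro x hx; exact Or.inr (ih x hx)

theorem popE_snd_subset (t : Int) (stack : List Int) :
    ∀ x ∈ (popE t stack).2, x ∈ stack := by
  induction stack with
  | nil => simp [popE]
  | cons p s ih =>
    intro x hx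
    by_cases hp : p = t
    · simp [popE, hp] at hx; simp [hx, hp]
    · simp [popE, hp] at hx
      rcases hx with h | h
      · simp [h]
      · exact List.mem_cons_of_mem _ (ih x h)

-- once the input is exhausted, everything A still emits comes from the stack
theorem emitE_nil_subset (ts : List Int) (stack : List Int) :
    ∀ x ∈ emitE ts [] stack, x ∈ stack := by
  induction ts generalizing stack with
  | nil => simp [emitE]
  | cons t ts' ih =>
    by_cases ht : t ∈ stack
    · intro x hx
      simp [emitE, ht] at hx
      rcases hx with h | h
      · exact popE_snd_subset t stack x h
      · exact popE_fst_subset t stack x (ih _ x h)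
    · simpa [emitE, ht, scanE] using ih stack

theorem altScan_none (t : Int) (rest stack : List Int)
    (h : altScan t rest stack = none) :
    scanE t rest stack = (rest.reverse ++ stack, [], []) ∧ t ∉ rest := by
  induction rest generalizing stack with
  | nil => simp [scanE]
  | cons c cs ih =>
    by_cases hc : c = t
    · simp [altScan, hc] at h
    · have h' : altScan t cs (c :: stack) = none := by simpa [altScan, hc] using h
      obtain ⟨h1, h2⟩ := ih _ h'
      refine ⟨by simp [scanE, hc, h1], ?_⟩
      simp [h2]
      exact fun hct => hc hct.symm

theorem altScan_some (t : Int) (rest stack : List Int) (r : List Int × List Int)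
    (h : altScan t rest stack = some r) :
    scanE t rest stack = (r.1, r.2, [t]) := by
  induction rest generalizing stack with
  | nil => simp [altScan] at h
  | cons c cs ih =>
    by_cases hc : c = t
    · simp [altScan, hc] at h
      simp [scanE, hc, ← h]
    · have h' : altScan t cs (c :: stack) = some r := by simpa [altScan, hc] using h
      simp [scanE, hc, ih _ h']

-- the key correspondence: B's verdict is exactly "A's emission stream equals the targets"
theorem altLoop_eq (ts : List Int) (rest stack : List Int) :
    altLoop ts rest stack = if emitE ts rest stack = ts then "possible" else "impossible" := by
  induction ts generalizing rest stack with
  | nil => simp [altLoop, emitE]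
  | cons t ts' ih =>
    by_cases ht : t ∈ stack
    · match stack, ht with
      | p :: s, ht =>
        by_cases hp : p = t
        · subst hp
          have hpop : popE p (p :: s) = (s, [p]) := by simp [popE]
          simp [altLoop, ht, emitE, hpop, ih]
        · have hhd : (popE t (p :: s)).2 = p :: (popE t s).2 := by simp [popE, hp]
          simp [altLoop, ht, hp, emitE, hhd]
    · cases hsc : altScan t rest stack with
      | none =>
        obtain ⟨h1, h2⟩ := altScan_none t rest stack hsc
        have htn : t ∉ rest.reverse ++ stack := by simp [ht, h2]
        have hne : emitE ts' [] (rest.reverse ++ stack) ≠ t :: ts' := by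
          intro heq
          exact htn (emitE_nil_subset ts' (rest.reverse ++ stack) t
            (by rw [heq]; exact List.mem_cons_self))
        simp [altLoop, ht, hsc, emitE, h1, hne]
      | some r =>
        have h1 := altScan_some t rest stack r hsc
        simp [altLoop, ht, hsc, emitE, h1, ih]

-- ===== VERDICT (by name: the statement is the Claim_ definition above) =====
theorem check_spec : Claim_equal_check := by
  intro ci co _
  unfold Spec_check check check_alt
  rw [checkLoop_eq, altLoop_eq]
  have hiff : ((emitE co.reverse ci []).reverse ++ [] = co) ↔ (emitE co.reverse ci [] = co.reverse) := by
    rw [List.append_nil, List.reverse_eq_iff]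
  by_cases h : emitE co.reverse ci [] = co.reverse
  · rw [if_pos (hiff.mpr h), if_pos h]
  · rw [if_neg (fun hx => h (hiff.mp hx)), if_neg h]
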